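-- pv_equiv track=rewrite | github.com/hivdb/chatpaper | src/prepare_doc/method_and_result.py | remove_non_markdown
-- ===== SOURCE A (Python) =====
-- def remove_non_markdown(text):
--     # TODO, debug
--     text = text.replace(
--         '<div>\n', '').replace(
--         '</div>\n', '').replace(
--         '::: section\n', '').replace(
--         ':::\n', '')
--
--     new_text = []
--     find_figure = False
--     for i in text.split('\n'):
--         if i.strip().lower() == '<figure>':
--             find_figure = True
--         elif find_figure and i.strip().lower() == '</figure>':
--             find_figure = False
--         elif not find_figure:
--             new_text.append(i)
--
--     text = '\n'.join(new_text)
--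
--     new_text = []
--     for i in text.split('\n'):
--         if i.startswith('![](') and i.endswith(')'):
--             continue
--         new_text.append(i)
--
--     text = '\n'.join(new_text)
--
--     return text
-- ===== SOURCE B (Python) =====
-- def remove_non_markdown(text):
--     text = text.replace(
--         '<div>\n', '').replace(
--         '</div>\n', '').replace(
--         '::: section\n', '').replace(
--         ':::\n', '')
--
--     kept = []
--     in_figure = False
--     for line in text.split('\n'):
--         low = line.strip().lower()
--         if low == '<figure>':
--             in_figure = True
--         elif in_figure:
--             if low == '</figure>':
--                 in_figure = False
--         elif not (line.startswith('![](') and line.endswith(')')):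
--             kept.append(line)
--     return '\n'.join(kept)
-- ===== Notes on version B (the rewrite author's own statement) =====
-- stated objective: simpler
-- what changed: A's two sequential filtering passes (figure-block filter, then join/split, then image-line filter) are fused into one loop over the split lines with an in_figure flag, eliminating the intermediate join and re-split.
import Mathlib
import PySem

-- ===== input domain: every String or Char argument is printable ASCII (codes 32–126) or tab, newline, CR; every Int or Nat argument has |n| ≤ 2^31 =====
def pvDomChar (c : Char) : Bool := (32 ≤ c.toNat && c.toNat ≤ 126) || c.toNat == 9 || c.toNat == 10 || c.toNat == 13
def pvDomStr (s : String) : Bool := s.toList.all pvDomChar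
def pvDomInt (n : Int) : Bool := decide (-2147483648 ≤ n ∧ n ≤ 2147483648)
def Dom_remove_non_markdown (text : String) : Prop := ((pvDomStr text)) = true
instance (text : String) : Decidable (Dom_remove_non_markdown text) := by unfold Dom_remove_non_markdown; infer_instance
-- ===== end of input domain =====

-- B fuses A's two filtering passes (figure blocks, then image lines) into one loop over the
-- split lines, dropping the intermediate join/split round-trip; objective: simpler, same cost.

-- ===== PORT A =====
-- the leading chain of .replace calls, shared text of both Pythons
def pvReplaceChain (text : String) : List Char :=
  PySem.Chars.replace (PySem.Chars.replace (PySem.Chars.replace (PySem.Chars.replace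
    text.toList "<div>\n".toList []) "</div>\n".toList []) "::: section\n".toList []) ":::\n".toList []

-- the body of A's first loop (figure filter), state = (new_text, find_figure)
def pvStepA (st : List (List Char) × Bool) (i : List Char) : List (List Char) × Bool :=
  if PySem.Chars.lower (PySem.Chars.strip i) = "<figure>".toList then (st.1, true)
  else if st.2 = true ∧ PySem.Chars.lower (PySem.Chars.strip i) = "</figure>".toList then (st.1, false)
  else if st.2 = false then (st.1 ++ [i], st.2)
  else st

def remove_non_markdown (text : String) : String :=
  let t : List Char := pvReplaceChain text
  let st := (PySem.Chars.splitOn t ['\n']).foldl pvStepA ([], false)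
  let t2 := PySem.Chars.join ['\n'] st.1
  let kept2 := (PySem.Chars.splitOn t2 ['\n']).foldl
    (fun (acc : List (List Char)) i =>
      if (PySem.Chars.startswith i "![](".toList && PySem.Chars.endswith i ")".toList) = true then acc
      else acc ++ [i]) []
  String.ofList (PySem.Chars.join ['\n'] kept2)

-- ===== PORT B =====
-- the body of B's single fused loop, state = (kept, in_figure)
def pvStepB (st : List (List Char) × Bool) (line : List Char) : List (List Char) × Bool :=
  let low := PySem.Chars.lower (PySem.Chars.strip line)
  if low = "<figure>".toList then (st.1, true)
  else if st.2 = true then (if low = "</figure>".toList then (st.1, false) else st)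
  else if !(PySem.Chars.startswith line "![](".toList && PySem.Chars.endswith line ")".toList) then
    (st.1 ++ [line], st.2)
  else st

def remove_non_markdown_alt (text : String) : String :=
  let t : List Char := pvReplaceChain text
  let st := (PySem.Chars.splitOn t ['\n']).foldl pvStepB ([], false)
  String.ofList (PySem.Chars.join ['\n'] st.1)

-- ===== PRECONDITION & SPEC =====
def Spec_remove_non_markdown (text : String) (out : String) : Prop := out = remove_non_markdown_alt text
instance (text : String) (out : String) : Decidable (Spec_remove_non_markdown text out) := by unfold Spec_remove_non_markdown; infer_instance

-- ===== CLAIM (what is proved, stated in full; the proofs are below) =====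
def Claim_equal_remove_non_markdown : Prop := ∀ (text : String), Dom_remove_non_markdown text → Spec_remove_non_markdown text (remove_non_markdown text)

-- ===== LEMMAS AND PROOFS =====

-- spine functions characterising the two loops
def pvImg (i : List Char) : Bool :=
  PySem.Chars.startswith i "![](".toList && PySem.Chars.endswith i ")".toList

def pvKeepFig : Bool → List (List Char) → List (List Char)
  | _, [] => []
  | b, i :: rest =>
    if PySem.Chars.lower (PySem.Chars.strip i) = "<figure>".toList then pvKeepFig true rest
    else if b = true ∧ PySem.Chars.lower (PySem.Chars.strip i) = "</figure>".toList then pvKeepFig false rest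
    else if b = false then i :: pvKeepFig b rest
    else pvKeepFig b rest

def pvFlagFig : Bool → List (List Char) → Bool
  | b, [] => b
  | b, i :: rest =>
    if PySem.Chars.lower (PySem.Chars.strip i) = "<figure>".toList then pvFlagFig true rest
    else if b = true ∧ PySem.Chars.lower (PySem.Chars.strip i) = "</figure>".toList then pvFlagFig false rest
    else pvFlagFig b rest

def pvKeepFused : Bool → List (List Char) → List (List Char)
  | _, [] => []
  | b, i :: rest =>
    if PySem.Chars.lower (PySem.Chars.strip i) = "<figure>".toList then pvKeepFused true rest
    else if b = true then (if PySem.Chars.lower (PySem.Chars.strip i) = "</figure>".toList then pvKeepFused false rest else pvKeepFused b rest)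
    else if !pvImg i then i :: pvKeepFused b rest
    else pvKeepFused b rest

theorem pv_foldA_eq (ls : List (List Char)) : ∀ (b : Bool) (acc : List (List Char)),
    ls.foldl pvStepA (acc, b) = (acc ++ pvKeepFig b ls, pvFlagFig b ls) := by
  induction ls with
  | nil => intro b acc; simp [pvKeepFig, pvFlagFig]
  | cons i rest ih =>
    intro b acc
    cases b <;> simp only [List.foldl_cons, pvStepA, pvKeepFig, pvFlagFig] <;>
      split_ifs <;> simp_all

theorem pv_foldB_eq (ls : List (List Char)) : ∀ (b : Bool) (acc : List (List Char)),
    ls.foldl pvStepB (acc, b) = (acc ++ pvKeepFused b ls, pvFlagFig b ls) := by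
  induction ls with
  | nil => intro b acc; simp [pvKeepFused, pvFlagFig]
  | cons i rest ih =>
    intro b acc
    cases b <;> simp only [List.foldl_cons, pvStepB, pvKeepFused, pvFlagFig, pvImg] <;>
      split_ifs <;> simp_all

-- fusing: B's kept list is A's figure-filtered list with the image lines filtered out
theorem pv_fuse (ls : List (List Char)) : ∀ (b : Bool),
    pvKeepFused b ls = (pvKeepFig b ls).filter (fun i => !pvImg i) := by
  induction ls with
  | nil => intro b; simp [pvKeepFused, pvKeepFig]
  | cons i rest ih =>
    intro b
    cases b <;> simp only [pvKeepFused, pvKeepFig, pvImg] <;>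
      split_ifs <;> simp_all [pvImg]

-- everything pvKeepFig keeps is one of the input lines
theorem pv_keepFig_subset (ls : List (List Char)) : ∀ (b : Bool) (x : List Char),
    x ∈ pvKeepFig b ls → x ∈ ls := by
  induction ls with
  | nil => intro b x hx; simp [pvKeepFig] at hx
  | cons i rest ih =>
    intro b x hx
    simp only [pvKeepFig] at hx
    split_ifs at hx with h1 h2 h3
    · exact List.mem_cons_of_mem _ (ih _ _ hx)
    · exact List.mem_cons_of_mem _ (ih _ _ hx)
    · rcases List.mem_cons.mp hx with rfl | hx'
      · exact List.mem_cons_self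
      · exact List.mem_cons_of_mem _ (ih _ _ hx')
    · exact List.mem_cons_of_mem _ (ih _ _ hx)

-- splitOn ['\n'] step equations
theorem pv_go_nil (f : Nat) (cur : List Char) (acc : List (List Char)) :
    PySem.Chars.splitOn.go ['\n'] f [] cur acc = (cur.reverse :: acc).reverse := by
  cases f <;> rw [PySem.Chars.splitOn.go] <;> simp

theorem pv_go_sep (f : Nat) (rest cur : List Char) (acc : List (List Char)) :
    PySem.Chars.splitOn.go ['\n'] (f+1) ('\n'::rest) cur acc
      = PySem.Chars.splitOn.go ['\n'] f rest [] (cur.reverse :: acc) := by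
  rw [PySem.Chars.splitOn.go]; simp [List.isPrefixOf]

theorem pv_go_ne (f : Nat) (c : Char) (rest cur : List Char) (acc : List (List Char)) (h : c ≠ '\n') :
    PySem.Chars.splitOn.go ['\n'] (f+1) (c::rest) cur acc
      = PySem.Chars.splitOn.go ['\n'] f rest (c::cur) acc := by
  rw [PySem.Chars.splitOn.go]; simp [List.isPrefixOf, (Ne.symm h)]

-- consume a newline-free chunk
theorem pv_go_chunk (chunk : List Char) : ∀ (f : Nat) (l cur : List Char) (acc : List (List Char)),
    '\n' ∉ chunk → chunk.length ≤ f →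
    PySem.Chars.splitOn.go ['\n'] f (chunk ++ l) cur acc
      = PySem.Chars.splitOn.go ['\n'] (f - chunk.length) l (chunk.reverse ++ cur) acc := by
  induction chunk with
  | nil => intro f l cur acc _ _; simp
  | cons c cs ih =>
    intro f l cur acc hmem hf
    simp only [List.length_cons] at hf ⊢
    obtain ⟨g, rfl⟩ : ∃ g, f = g + 1 := ⟨f - 1, by omega⟩
    have hc : c ≠ '\n' := fun h => hmem (h ▸ List.mem_cons_self)
    rw [List.cons_append, pv_go_ne _ _ _ _ _ hc,
        ih g l (c :: cur) acc (fun h => hmem (List.mem_cons_of_mem _ h)) (by omega)]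
    have harith : g + 1 - (cs.length + 1) = g - cs.length := by omega
    rw [harith]
    simp

-- every piece of splitOn s ['\n'] is newline-free
theorem pv_go_mem (f : Nat) : ∀ (l cur : List Char) (acc : List (List Char)),
    l.length < f → '\n' ∉ cur → (∀ x ∈ acc, '\n' ∉ x) →
    ∀ x ∈ PySem.Chars.splitOn.go ['\n'] f l cur acc, '\n' ∉ x := by
  induction f with
  | zero => intro l cur acc h; omega
  | succ g ih =>
    intro l cur acc hf hcur hacc
    cases l with
    | nil =>
      rw [pv_go_nil]
      intro x hx
      simp only [List.mem_reverse, List.mem_cons] at hx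
      rcases hx with rfl | hx
      · simpa using hcur
      · exact hacc x hx
    | cons c rest =>
      by_cases hc : c = '\n'
      · subst hc
        rw [pv_go_sep]
        refine ih rest [] _ (by simp at hf ⊢; omega) (by simp) ?_
        intro x hx
        rcases List.mem_cons.mp hx with rfl | hx
        · simpa using hcur
        · exact hacc x hx
      · rw [pv_go_ne _ _ _ _ _ hc]
        refine ih rest (c :: cur) acc (by simp at hf ⊢; omega) ?_ hacc
        intro h
        rcases List.mem_cons.mp h with h' | h'
        · exact hc h'.symm
        · exact hcur h'

theorem pv_splitOn_mem (s : List Char) : ∀ x ∈ PySem.Chars.splitOn s ['\n'], '\n' ∉ x := by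
  unfold PySem.Chars.splitOn
  exact pv_go_mem (s.length + 1) s [] [] (by omega) (by simp) (by simp)

-- splitOn inverts join on a nonempty list of newline-free pieces
theorem pv_go_inter (tl : List (List Char)) : ∀ (h : List Char) (f : Nat) (cur : List Char) (acc : List (List Char)),
    (∀ x ∈ h :: tl, '\n' ∉ x) → (List.intercalate ['\n'] (h :: tl)).length + 1 ≤ f →
    PySem.Chars.splitOn.go ['\n'] f (List.intercalate ['\n'] (h :: tl)) cur acc
      = acc.reverse ++ (cur.reverse ++ h) :: tl := by
  induction tl with
  | nil =>
    intro h f cur acc hmem hf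
    have h1 : List.intercalate ['\n'] [h] = h := by simp [List.intercalate]
    rw [h1] at hf ⊢
    have := pv_go_chunk h f [] cur acc (hmem h List.mem_cons_self) (by omega)
    simp only [List.append_nil] at this
    rw [this, pv_go_nil]
    simp
  | cons y ys ih =>
    intro h f cur acc hmem hf
    have hinter : List.intercalate ['\n'] (h :: y :: ys)
        = h ++ '\n' :: List.intercalate ['\n'] (y :: ys) := by
      simp [List.intercalate]
    rw [hinter] at hf ⊢
    have hlen : h.length + 1 + (List.intercalate ['\n'] (y :: ys)).length + 1 ≤ f := by
      simp only [List.length_append, List.length_cons] at hf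
      omega
    rw [pv_go_chunk h f _ cur acc (hmem h List.mem_cons_self) (by omega)]
    obtain ⟨g, hg⟩ : ∃ g, f - h.length = g + 1 := ⟨f - h.length - 1, by omega⟩
    rw [hg, pv_go_sep]
    rw [ih y g [] _ (fun x hx => hmem x (List.mem_cons_of_mem _ hx)) (by omega)]
    simp

theorem pv_splitOn_join (l : List (List Char)) (hne : l ≠ []) (hmem : ∀ x ∈ l, '\n' ∉ x) :
    PySem.Chars.splitOn (PySem.Chars.join ['\n'] l) ['\n'] = l := by
  cases l with
  | nil => exact absurd rfl hne
  | cons h tl =>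
    unfold PySem.Chars.splitOn PySem.Chars.join
    rw [pv_go_inter tl h _ [] [] hmem (by omega)]
    simp

-- A's second loop is a filter
theorem pv_fold2_eq (ls : List (List Char)) :
    ls.foldl (fun (acc : List (List Char)) i =>
        if (PySem.Chars.startswith i "![](".toList && PySem.Chars.endswith i ")".toList) = true then acc
        else acc ++ [i]) []
      = ls.filter (fun i => !pvImg i) := by
  have hfun : (fun (acc : List (List Char)) i =>
      if (PySem.Chars.startswith i "![](".toList && PySem.Chars.endswith i ")".toList) = true then acc
      else acc ++ [i])
    = (fun (acc : List (List Char)) i => if (!pvImg i) = true then acc ++ [id i] else acc) := by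
    funext acc i
    cases hs : PySem.Chars.startswith i ['!', '[', ']', '('] <;>
      cases he : PySem.Chars.endswith i [')'] <;> simp [pvImg, hs, he]
  rw [hfun, PySem.List.foldl_append_if]
  simp

-- ===== VERDICT (by name: the statement is the Claim_ definition above) =====
theorem remove_non_markdown_spec : Claim_equal_remove_non_markdown := by
  intro text _
  unfold Spec_remove_non_markdown remove_non_markdown remove_non_markdown_alt
  simp only [pv_foldA_eq, pv_foldB_eq, List.nil_append, pv_fold2_eq, pv_fuse]
  rcases hK : pvKeepFig false (PySem.Chars.splitOn (pvReplaceChain text) ['\n']) with _ | ⟨k, ks⟩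
  · rfl
  · have hk : ∀ x ∈ (k :: ks), '\n' ∉ x := by
      intro x hx
      exact pv_splitOn_mem _ x (pv_keepFig_subset _ _ x (hK ▸ hx))
    rw [pv_splitOn_join (k :: ks) (by simp) hk]
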